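-- pv_equiv track=rewrite | github.com/MrBrantCode/unitest_baseline | mut_generate/mist_train_cf/cf_52048/solution.py | shift_letters
-- ===== SOURCE A (Python) =====
-- def shift_letters(text):
--     result = ""
--     for i in text:
--         if i.isalpha():
--             if i == 'z':   # transition from z to a
--                 new_char = 'a'
--             elif i == 'Z':   # transition from Z to A
--                 new_char = 'A'
--             else:
--                 new_char = chr(ord(i) + 1)
--             result += new_char
--         else:
--             result += i
--     return result
-- ===== SOURCE B (Python) =====
-- def shift_letters(text):
--     low = 'abcdefghijklmnopqrstuvwxyz'
--     up = low.upper()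
--     table = str.maketrans(low + up, low[1:] + low[0] + up[1:] + up[0])
--     return text.translate(table)
-- ===== Notes on version B (the rewrite author's own statement) =====
-- stated objective: idiomatic
-- what changed: Replaces the per-character if/elif branching loop with repeated string concatenation by a translation table built once (str.maketrans of the two rotated alphabets) applied in a single text.translate call.
import Mathlib
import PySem

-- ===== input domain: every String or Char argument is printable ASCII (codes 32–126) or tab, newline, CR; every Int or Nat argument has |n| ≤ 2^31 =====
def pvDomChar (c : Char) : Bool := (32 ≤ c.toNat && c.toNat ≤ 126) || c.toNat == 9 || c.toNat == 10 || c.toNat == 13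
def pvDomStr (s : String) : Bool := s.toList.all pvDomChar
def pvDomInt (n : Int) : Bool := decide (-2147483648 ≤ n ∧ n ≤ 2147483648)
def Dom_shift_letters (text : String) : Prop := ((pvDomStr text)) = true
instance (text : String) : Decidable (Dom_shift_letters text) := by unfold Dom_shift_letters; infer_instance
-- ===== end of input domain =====

-- B replaces A's per-character if/elif branching with a translation table built once and a single map — idiomatic, same result.
set_option maxRecDepth 10000


-- ===== PORT A =====
def shift_letters (text : String) : String :=
  String.ofList (text.toList.foldl (fun result i =>
    if PySem.Chars.isalpha i then
      let new_char : Char :=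
        if i = 'z' then 'a'
        else if i = 'Z' then 'A'
        else Char.ofNat (i.toNat + 1)
      result ++ [new_char]
    else
      result ++ [i]) [])

-- ===== PORT B =====
def pvLow : List Char := "abcdefghijklmnopqrstuvwxyz".toList
def pvUp : List Char := PySem.Chars.upper pvLow
def pvTable : PySem.Dict Char Char :=
  PySem.Dict.ofList ((pvLow ++ pvUp).zip
    ((pvLow.drop 1 ++ pvLow.take 1) ++ (pvUp.drop 1 ++ pvUp.take 1)))

def shift_letters_alt (text : String) : String :=
  String.ofList (text.toList.map (fun c => pvTable.getD c c))

-- ===== PRECONDITION & SPEC =====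
def Spec_shift_letters (text : String) (out : String) : Prop := out = shift_letters_alt text
instance (text : String) (out : String) : Decidable (Spec_shift_letters text out) := by unfold Spec_shift_letters; infer_instance

-- ===== CLAIM (what is proved, stated in full; the proofs are below) =====
def Claim_equal_shift_letters : Prop := ∀ (text : String), Dom_shift_letters text → Spec_shift_letters text (shift_letters text)

-- ===== LEMMAS AND PROOFS =====
-- per-character step of A
def pvStepA (c : Char) : Char :=
  if PySem.Chars.isalpha c then
    if c = 'z' then 'a'
    else if c = 'Z' then 'A'
    else Char.ofNat (c.toNat + 1)
  else c

lemma stepA_eq_stepB_ofNat : ∀ n : Nat, n < 127 → pvStepA (Char.ofNat n) = pvTable.getD (Char.ofNat n) (Char.ofNat n) := by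
  decide

lemma stepA_eq_stepB (c : Char) (h : pvDomChar c = true) :
    pvStepA c = pvTable.getD c c := by
  have hlt : c.toNat < 127 := by
    unfold pvDomChar at h
    simp only [Bool.or_eq_true, Bool.and_eq_true, decide_eq_true_eq, beq_iff_eq, Nat.le_iff_lt_or_eq] at h
    omega
  have := stepA_eq_stepB_ofNat c.toNat hlt
  simpa using this

lemma foldl_append_eq_map (l : List Char) (acc : List Char) :
    l.foldl (fun result i =>
      if PySem.Chars.isalpha i then
        result ++ [if i = 'z' then 'a' else if i = 'Z' then 'A' else Char.ofNat (i.toNat + 1)]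
      else result ++ [i]) acc = acc ++ l.map pvStepA := by
  induction l generalizing acc with
  | nil => simp
  | cons x xs ih =>
    simp only [List.foldl_cons, List.map_cons, ih, pvStepA]
    by_cases hx : PySem.Chars.isalpha x <;> simp [hx]

-- ===== VERDICT (by name: the statement is the Claim_ definition above) =====
theorem shift_letters_spec : Claim_equal_shift_letters := by
  intro text hdom
  unfold Spec_shift_letters shift_letters shift_letters_alt
  have h := foldl_append_eq_map text.toList []
  simp only [List.nil_append] at h
  rw [h]
  congr 1
  apply List.map_congr_left
  intro c hc
  apply stepA_eq_stepB
  unfold Dom_shift_letters pvDomStr at hdom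
  exact List.all_eq_true.mp hdom c hc
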